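-- pv_equiv track=rewrite | github.com/ttstormxx/jjjjjjjjjjjjjs | jjjjjjjjjjjjjs.py | stairsSplitAndStitch
-- ===== SOURCE A (Python) =====
-- def stairsSplitAndStitch(apiList):
--     """阶梯切割
--     逐级分解api，返回1级、2级、3级。。。api列表
--     /api/home/worker/worklist------>/api /api/home /api/home/worker /api/home/worker/worklist
--     包含初始元素！
--
--     Args:
--         apiList (_type_): _description_
--     """
--     #!考虑api末尾的/问题，当前去除末尾/ 有些情况必须有根/才能访问
--     lst=[]
--     for api in apiList:
--         tmp=[]
--         tmp=api.strip("/").split("/")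
--         if len(tmp)!=0:
--             tmpApi="/"
--             for i in range(len(tmp)):
--                 if tmp[i]!="":
--                     tmpApi+=tmp[i]+"/"
--                     lst.append(tmpApi)
--     mydicc={}
--     for x in lst:
--         mydicc[x.rstrip("/")]=None
--     lst=list(mydicc.keys())
--     return lst
-- ===== SOURCE B (Python) =====
-- def stairsSplitAndStitch(apiList):
--     """Cumulative path prefixes of each api, deduplicated in first-seen order.
--
--     Computes each prefix directly from the cleaned segment list instead of
--     threading a trailing-slash accumulator string plus an rstrip cleanup pass.
--     """
--     prefixes = []
--     for api in apiList:
--         parts = [p for p in api.strip('/').split('/') if p]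
--         for i in range(len(parts)):
--             prefixes.append('/' + '/'.join(parts[:i + 1]))
--     return list(dict.fromkeys(prefixes))
-- ===== Notes on version B (the rewrite author's own statement) =====
-- stated objective: simpler
-- what changed: Each cumulative prefix is computed directly as '/' + '/'.join(parts[:i+1]) over the once-cleaned nonempty segment list, replacing A's threaded trailing-slash accumulator string and its separate rstrip('/')-into-dict normalization pass; dedup keeps first-seen order via dict.fromkeys.
import Mathlib
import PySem

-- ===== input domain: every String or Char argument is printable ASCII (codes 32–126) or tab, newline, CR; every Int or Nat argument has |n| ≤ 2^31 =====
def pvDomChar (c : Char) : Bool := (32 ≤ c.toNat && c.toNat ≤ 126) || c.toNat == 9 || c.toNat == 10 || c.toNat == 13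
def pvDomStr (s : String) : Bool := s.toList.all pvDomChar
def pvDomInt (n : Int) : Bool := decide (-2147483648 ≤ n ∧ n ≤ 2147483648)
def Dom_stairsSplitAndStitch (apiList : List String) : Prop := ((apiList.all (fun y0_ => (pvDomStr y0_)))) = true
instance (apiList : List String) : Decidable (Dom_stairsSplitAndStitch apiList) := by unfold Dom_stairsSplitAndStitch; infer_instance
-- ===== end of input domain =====

-- B builds each cumulative prefix directly from the cleaned segment list ('/' + '/'.join(parts[:i+1]))
-- instead of A's trailing-slash accumulator string plus an rstrip('/') normalization pass (objective: simpler).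

-- ===== PORT A =====
-- hand port of Python's x.rstrip("/") (PySem.Chars has stripChars for both ends only):
-- drop the trailing run of '/' characters; exact — mirrors PySem.Chars.stripChars's dropWhile-on-reverse shape.
def pyRstripSlash (s : List Char) : List Char :=
  (s.reverse.dropWhile (fun c => (['/'] : List Char).contains c)).reverse

def stairsSplitAndStitch (apiList : List String) : List String :=
  let lst : List (List Char) :=
    apiList.foldl (fun lst api =>
      let tmp := PySem.Chars.splitOn (PySem.Chars.stripChars api.toList ['/']) ['/']
      if tmp.length ≠ 0 then
        (tmp.foldl (fun (st : List Char × List (List Char)) seg =>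
            if seg ≠ [] then
              let tmpApi := st.1 ++ seg ++ ['/']
              (tmpApi, st.2 ++ [tmpApi])
            else st)
          (['/'], lst)).2
      else lst) []
  let mydicc : PySem.Dict (List Char) (Option Unit) :=
    lst.foldl (fun d x => d.insert (pyRstripSlash x) none) PySem.Dict.empty
  mydicc.keys.map String.ofList

-- ===== PORT B =====
def stairsSplitAndStitch_alt (apiList : List String) : List String :=
  let prefixes : List (List Char) :=
    apiList.flatMap (fun api =>
      let parts := (PySem.Chars.splitOn (PySem.Chars.stripChars api.toList ['/']) ['/']).filter (fun p => p ≠ [])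
      (List.range parts.length).map (fun i => '/' :: PySem.Chars.join ['/'] (parts.take (i + 1))))
  (PySem.List.dedup prefixes).map String.ofList

-- ===== PRECONDITION & SPEC =====
def Spec_stairsSplitAndStitch (apiList : List String) (out : List String) : Prop := out = stairsSplitAndStitch_alt apiList
instance (apiList : List String) (out : List String) : Decidable (Spec_stairsSplitAndStitch apiList out) := by unfold Spec_stairsSplitAndStitch; infer_instance

-- ===== CLAIM (what is proved, stated in full; the proofs are below) =====
def Claim_equal_stairsSplitAndStitch : Prop := ∀ (apiList : List String), Dom_stairsSplitAndStitch apiList → Spec_stairsSplitAndStitch apiList (stairsSplitAndStitch apiList)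

-- ===== LEMMAS AND PROOFS =====

-- A's inner-loop prefixes (trailing slash kept), over the nonempty segments, from accumulator c
def aPref (c : List Char) : List (List Char) → List (List Char)
  | [] => []
  | s :: ss => (c ++ s ++ ['/']) :: aPref (c ++ s ++ ['/']) ss

-- A's inner-loop final accumulator
def aAcc (c : List Char) : List (List Char) → List Char
  | [] => c
  | s :: ss => aAcc (c ++ s ++ ['/']) ss

-- B's prefixes (no trailing slash), from accumulator c
def bPref (c : List Char) : List (List Char) → List (List Char)
  | [] => []
  | s :: ss => (c ++ s) :: bPref (c ++ s ++ ['/']) ss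

theorem foldA (tmp : List (List Char)) (c : List Char) (l : List (List Char)) :
    tmp.foldl (fun (st : List Char × List (List Char)) seg =>
        if seg ≠ [] then
          let tmpApi := st.1 ++ seg ++ ['/']
          (tmpApi, st.2 ++ [tmpApi])
        else st) (c, l)
      = (aAcc c (tmp.filter (fun p => p ≠ [])), l ++ aPref c (tmp.filter (fun p => p ≠ []))) := by
  induction tmp generalizing c l with
  | nil => simp [aAcc, aPref]
  | cons s ss ih =>
    by_cases hs : s = []
    · subst hs; simpa [aAcc, aPref] using ih c l
    · simp only [List.foldl_cons, List.filter_cons, ne_eq]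
      simpa [aAcc, aPref, hs] using ih (c ++ s ++ ['/']) (l ++ [c ++ s ++ ['/']])

theorem rstrip_append (t s : List Char) (hne : s ≠ []) (hs : '/' ∉ s) :
    pyRstripSlash (t ++ s ++ ['/']) = t ++ s := by
  obtain ⟨x, xs, hrev⟩ : ∃ x xs, s.reverse = x :: xs := by
    cases h : s.reverse with
    | nil => exact absurd (by simpa using congrArg List.reverse h) hne
    | cons x xs => exact ⟨x, xs, rfl⟩
  have hx : x ≠ '/' := by
    intro h; apply hs; rw [← List.mem_reverse, hrev, h]; exact List.mem_cons_self
  have hsv : s = xs.reverse ++ [x] := by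
    rw [← List.reverse_reverse s, hrev, List.reverse_cons]
  unfold pyRstripSlash
  have harr : (t ++ s ++ ['/']).reverse = '/' :: x :: (xs ++ t.reverse) := by
    rw [hsv]; simp
  rw [harr, List.dropWhile_cons, if_pos (show ((['/'] : List Char).contains '/') = true by decide),
    List.dropWhile_cons, if_neg (by simp [hx])]
  simp [hsv]

theorem map_rstrip_aPref (parts : List (List Char)) (c : List Char)
    (h : ∀ s ∈ parts, s ≠ [] ∧ '/' ∉ s) :
    (aPref c parts).map pyRstripSlash = bPref c parts := by
  induction parts generalizing c with
  | nil => simp [aPref, bPref]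
  | cons s ss ih =>
    obtain ⟨hne, hs⟩ := h s List.mem_cons_self
    simp only [aPref, bPref, List.map_cons]
    rw [rstrip_append c s hne hs, ih _ (fun x hx => h x (List.mem_cons_of_mem _ hx))]

theorem join_cons_ne (s : List Char) (t : List (List Char)) (ht : t ≠ []) :
    PySem.Chars.join ['/'] (s :: t) = s ++ '/' :: PySem.Chars.join ['/'] t := by
  cases t with
  | nil => exact absurd rfl ht
  | cons y ys => simp [PySem.Chars.join, List.intercalate, List.intersperse]

theorem bPref_eq_ranges (parts : List (List Char)) (c : List Char) :
    bPref c parts = (List.range parts.length).map (fun i => c ++ PySem.Chars.join ['/'] (parts.take (i + 1))) := by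
  induction parts generalizing c with
  | nil => simp [bPref]
  | cons s ss ih =>
    simp only [bPref, List.length_cons, List.range_succ_eq_map, List.map_cons, List.map_map]
    congr 1
    · simp [PySem.Chars.join, List.intercalate]
    · rw [ih (c ++ s ++ ['/'])]
      apply List.map_congr_left
      intro i hi
      have hiz : i < ss.length := List.mem_range.mp hi
      have hss : ss.take (i + 1) ≠ [] := by
        intro hnil
        rcases (List.take_eq_nil_iff).mp hnil with h | h
        · omega
        · subst h; simp at hiz
      simp only [Function.comp_apply, Nat.succ_eq_add_one, List.take_succ_cons]
      rw [join_cons_ne _ _ hss]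
      simp

theorem splitOn_go_no_slash (fuel : Nat) (l cur : List Char) (acc : List (List Char))
    (hl : l.length < fuel) (hacc : ∀ p ∈ acc, '/' ∉ p) (hcur : '/' ∉ cur) :
    ∀ p ∈ PySem.Chars.splitOn.go ['/'] fuel l cur acc, '/' ∉ p := by
  induction fuel generalizing l cur acc with
  | zero => omega
  | succ fuel ih =>
    cases l with
    | nil =>
      intro p hp
      simp only [PySem.Chars.splitOn.go, List.mem_reverse, List.mem_cons] at hp
      rcases hp with h | h
      · subst h; simpa using hcur
      · exact hacc p h
    | cons c rest =>
      simp only [PySem.Chars.splitOn.go]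
      by_cases hpre : (['/'] : List Char).isPrefixOf (c :: rest) = true
      · rw [if_pos hpre]
        apply ih
        · simpa using Nat.lt_of_succ_lt_succ hl
        · intro p hp
          rcases List.mem_cons.mp hp with h | h
          · subst h; simpa using hcur
          · exact hacc p h
        · simp
      · rw [if_neg hpre]
        apply ih
        · simpa using Nat.lt_of_succ_lt_succ hl
        · exact hacc
        · intro hmem
          rcases List.mem_cons.mp hmem with h | h
          · apply hpre; simp [List.isPrefixOf, ← h]
          · exact hcur h

theorem splitOn_no_slash (s : List Char) :
    ∀ p ∈ PySem.Chars.splitOn s ['/'], '/' ∉ p := by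
  apply splitOn_go_no_slash
  · omega
  · intro p hp; simp at hp
  · simp

-- A's per-api prefix list (what the inner loop appends for one api)
def perA (api : String) : List (List Char) :=
  aPref ['/'] ((PySem.Chars.splitOn (PySem.Chars.stripChars api.toList ['/']) ['/']).filter (fun p => p ≠ []))

theorem foldTop (apis : List String) (l0 : List (List Char)) :
    apis.foldl (fun lst api =>
      let tmp := PySem.Chars.splitOn (PySem.Chars.stripChars api.toList ['/']) ['/']
      if tmp.length ≠ 0 then
        (tmp.foldl (fun (st : List Char × List (List Char)) seg =>
            if seg ≠ [] then
              let tmpApi := st.1 ++ seg ++ ['/']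
              (tmpApi, st.2 ++ [tmpApi])
            else st)
          (['/'], lst)).2
      else lst) l0
    = l0 ++ apis.flatMap perA := by
  induction apis generalizing l0 with
  | nil => simp
  | cons api rest ih =>
    simp only [List.foldl_cons, List.flatMap_cons]
    by_cases h0 : (PySem.Chars.splitOn (PySem.Chars.stripChars api.toList ['/']) ['/']).length ≠ 0
    · rw [if_pos h0, foldA]
      rw [ih]
      simp [perA, List.append_assoc]
    · rw [if_neg h0]
      have hnil : PySem.Chars.splitOn (PySem.Chars.stripChars api.toList ['/']) ['/'] = [] := by
        simpa using h0
      rw [ih]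
      simp [perA, hnil, aPref]

theorem perA_rstrip (api : String) :
    (perA api).map pyRstripSlash
      = (let parts := (PySem.Chars.splitOn (PySem.Chars.stripChars api.toList ['/']) ['/']).filter (fun p => p ≠ [])
         (List.range parts.length).map (fun i => '/' :: PySem.Chars.join ['/'] (parts.take (i + 1)))) := by
  unfold perA
  rw [map_rstrip_aPref, bPref_eq_ranges]
  · simp
  · intro s hs
    have hmem := List.mem_filter.mp hs
    exact ⟨by simpa using hmem.2, splitOn_no_slash _ s hmem.1⟩

-- ===== VERDICT (by name: the statement is the Claim_ definition above) =====
theorem stairsSplitAndStitch_spec : Claim_equal_stairsSplitAndStitch := by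
  intro apiList _
  unfold Spec_stairsSplitAndStitch stairsSplitAndStitch stairsSplitAndStitch_alt
  simp only []
  rw [foldTop, List.nil_append]
  rw [PySem.Dict.keys_foldl_insert_key (apiList.flatMap perA) pyRstripSlash (fun _ _ => none) PySem.Dict.empty]
  simp only [PySem.List.dedup_eq_ofList]
  congr 1
  have hkeys : (PySem.Dict.empty : PySem.Dict (List Char) (Option Unit)).keys = [] := rfl
  rw [hkeys, PySem.Set.update_nil_left]
  congr 1
  rw [List.map_flatMap]
  congr 1
  funext api
  simpa using perA_rstrip api
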